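-- pv_equiv track=rewrite | github.com/tuturr/n-puzzle | utils.py | check_duplicate_numbers_in_grid
-- ===== SOURCE A (Python) =====
-- def check_duplicate_numbers_in_grid(grid):
--     elems = []
--     for elem in grid:
--         if elem not in elems:
--             elems.append(elem)
--         else:
--             return True
--     return False
-- ===== SOURCE B (Python) =====
-- def check_duplicate_numbers_in_grid(grid):
--     return len(set(grid)) != len(grid)
-- ===== Notes on version B (the rewrite author's own statement) =====
-- stated objective: idiomatic
-- what changed: Replaced the incremental seen-list loop with early return by a single closed-form cardinality test: build set(grid) once and compare its size with len(grid).
import Mathlib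
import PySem

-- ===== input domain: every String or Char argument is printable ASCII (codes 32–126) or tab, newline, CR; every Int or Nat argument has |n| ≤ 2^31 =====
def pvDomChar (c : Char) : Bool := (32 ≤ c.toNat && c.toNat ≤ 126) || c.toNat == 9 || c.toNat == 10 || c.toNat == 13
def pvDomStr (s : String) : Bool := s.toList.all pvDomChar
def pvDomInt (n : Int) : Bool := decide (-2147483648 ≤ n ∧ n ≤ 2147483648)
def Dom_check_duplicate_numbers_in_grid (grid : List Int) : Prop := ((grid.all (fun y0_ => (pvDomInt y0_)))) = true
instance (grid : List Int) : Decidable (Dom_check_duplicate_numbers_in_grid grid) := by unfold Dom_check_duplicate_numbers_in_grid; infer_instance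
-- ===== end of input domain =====

-- B replaces A's seen-list loop with the idiomatic set-cardinality test len(set(grid)) != len(grid).


-- ===== PORT A =====
-- the loop over grid, carrying the 'elems' list A builds; 'elem not in elems' / append / early return True
def pvA_loop : List Int → List Int → Bool
  | [], _ => false
  | e :: rest, elems =>
      if elems.contains e then true
      else pvA_loop rest (elems ++ [e])

def check_duplicate_numbers_in_grid (grid : List Int) : Bool :=
  pvA_loop grid []

-- ===== PORT B =====
-- len(set(grid)) != len(grid)
def check_duplicate_numbers_in_grid_alt (grid : List Int) : Bool :=
  (PySem.Set.ofList grid).length != grid.length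

-- ===== PRECONDITION & SPEC =====
def Spec_check_duplicate_numbers_in_grid (grid : List Int) (out : Bool) : Prop := out = check_duplicate_numbers_in_grid_alt grid
instance (grid : List Int) (out : Bool) : Decidable (Spec_check_duplicate_numbers_in_grid grid out) := by unfold Spec_check_duplicate_numbers_in_grid; infer_instance

-- ===== CLAIM (what is proved, stated in full; the proofs are below) =====
def Claim_equal_check_duplicate_numbers_in_grid : Prop := ∀ (grid : List Int), Dom_check_duplicate_numbers_in_grid grid → Spec_check_duplicate_numbers_in_grid grid (check_duplicate_numbers_in_grid grid)

-- ===== LEMMAS AND PROOFS =====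

-- A's loop returns false exactly when grid has no repeats and no element already in elems
theorem pvA_loop_eq (grid elems : List Int) :
    pvA_loop grid elems = !decide (grid.Nodup ∧ ∀ e ∈ grid, e ∉ elems) := by
  induction grid generalizing elems with
  | nil => simp [pvA_loop]
  | cons e rest ih =>
    by_cases he : e ∈ elems
    · simp [pvA_loop, he]
    · simp only [pvA_loop, List.contains_eq_mem, he, decide_false, Bool.false_eq_true,
        if_false, ih]
      congr 1
      simp only [decide_eq_decide, List.nodup_cons, List.mem_cons, List.mem_append]
      constructor
      · intro ⟨hn, h⟩
        refine ⟨⟨fun hm => by simpa using h e hm, hn⟩, ?_⟩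
        rintro x (rfl | hx)
        · exact he
        · intro hx'
          exact h x hx (Or.inl hx')
      · intro ⟨⟨hne, hn⟩, h⟩
        refine ⟨hn, fun x hx => ?_⟩
        rintro (hx' | rfl | h0)
        · exact h x (Or.inr hx) hx'
        · exact hne hx
        · exact absurd h0 (List.not_mem_nil)

-- set(grid) has the same cardinality as grid exactly when grid has no duplicates
theorem length_ofList_eq_iff_nodup (grid : List Int) :
    (PySem.Set.ofList grid).length = grid.length ↔ grid.Nodup := by
  have hperm : (PySem.Set.ofList grid).Perm grid.dedup := by
    refine (List.perm_ext_iff_of_nodup (PySem.Set.nodup_ofList grid) grid.nodup_dedup).2 ?_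
    intro x
    simp [PySem.Set.mem_ofList, List.mem_dedup]
  rw [hperm.length_eq]
  constructor
  · intro h
    exact List.dedup_eq_self.1 (grid.dedup_sublist.eq_of_length h)
  · intro h
    rw [List.dedup_eq_self.2 h]

-- ===== VERDICT (by name: the statement is the Claim_ definition above) =====
theorem check_duplicate_numbers_in_grid_spec : Claim_equal_check_duplicate_numbers_in_grid := by
  intro grid _
  unfold Spec_check_duplicate_numbers_in_grid check_duplicate_numbers_in_grid
    check_duplicate_numbers_in_grid_alt
  rw [pvA_loop_eq]
  have h := length_ofList_eq_iff_nodup grid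
  by_cases hn : grid.Nodup
  · simp [hn, h.2 hn]
  · have hne : (PySem.Set.ofList grid).length ≠ grid.length := fun hc => hn (h.1 hc)
    simp [hn, hne]
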